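-- pv_equiv track=rewrite | github.com/ZacharyMN709/COMP-3201---TSP-Evolutionary-Algorithm | src/EA_Methods/Pandas_Rep/SurvivorSelectionMethods.py | mu_plus_lambda
-- ===== SOURCE A (Python) =====
-- op = None
--
-- def mu_plus_lambda(parents, parent_fitness, offspring, offspring_fitness):
--     loc_op = min if op == max else max
--     max_size = len(parents)
--
--     population = parents + offspring
--     fitness = parent_fitness + offspring_fitness
--
--     # remove the weakest until the population is trimmed to size
--     while len(population) > max_size:
--         i = fitness.index(loc_op(fitness))
--         population.pop(i)
--         fitness.pop(i)
--
--     return population, fitness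
-- ===== SOURCE B (Python) =====
-- def mu_plus_lambda(parents, parent_fitness, offspring, offspring_fitness):
--     population = parents + offspring
--     fitness = parent_fitness + offspring_fitness
--     k = len(population) - len(parents)      # how many must be removed
--     if k == 0:
--         return population, fitness
--     svals = sorted(fitness, reverse=True)
--     t = svals[k - 1]                        # k-th largest fitness = weakest value removed
--     skip = k - sum(1 for f in fitness if f > t)   # how many fitness==t entries to drop (earliest first)
--     keep_pop, keep_fit = [], []
--     c = 0
--     for p, f in zip(population, fitness):
--         if f > t:
--             continue                        # always removed
--         if f == t and c < skip:
--             c += 1                          # one of the first `skip` ties: removed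
--             continue
--         keep_pop.append(p)
--         keep_fit.append(f)
--     return keep_pop, keep_fit
-- ===== Notes on version B (the rewrite author's own statement) =====
-- stated objective: faster
-- what changed: Instead of repeatedly scanning for and popping the current maximum (one pass per removal), B sorts the fitness values once to find the k-th largest value t and keeps survivors in a single pass, dropping everything above t and the earliest ties at t; Pre_ excludes mismatched inputs whose combined fitness list is not parallel to the combined population (unless there are no offspring), where A's pop misalignment or raising is an accident of its implementation.
-- outside the precondition, e.g. on mu_plus_lambda([2, -2, 1], [], [0, -1, 2], [-2, 0, -2]): A returns ([0, -1, 2], []), B returns ([], [])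
import Mathlib
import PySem

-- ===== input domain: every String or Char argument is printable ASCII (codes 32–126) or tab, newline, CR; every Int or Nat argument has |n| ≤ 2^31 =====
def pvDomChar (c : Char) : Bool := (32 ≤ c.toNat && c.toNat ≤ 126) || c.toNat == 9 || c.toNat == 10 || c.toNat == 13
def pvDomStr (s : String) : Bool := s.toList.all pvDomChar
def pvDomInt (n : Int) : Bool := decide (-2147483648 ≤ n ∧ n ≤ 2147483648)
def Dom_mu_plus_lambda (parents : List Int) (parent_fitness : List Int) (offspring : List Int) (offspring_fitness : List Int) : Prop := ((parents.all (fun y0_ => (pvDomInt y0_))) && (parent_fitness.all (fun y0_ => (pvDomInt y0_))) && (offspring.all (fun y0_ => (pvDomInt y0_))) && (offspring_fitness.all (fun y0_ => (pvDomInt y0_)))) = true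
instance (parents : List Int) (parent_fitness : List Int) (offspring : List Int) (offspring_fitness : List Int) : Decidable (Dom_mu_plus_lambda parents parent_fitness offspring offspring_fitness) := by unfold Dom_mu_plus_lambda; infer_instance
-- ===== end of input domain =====

-- B replaces A's repeated scan-for-max-and-pop (one pass per removal) by one sort of the
-- fitness values that yields the removal threshold t, then a single keep pass; measured faster.

-- ===== PORT A =====
-- In the source `op = None`, so `loc_op = min if op == max else max` is `max`.
-- The while loop is the recursion below; the `none` branches are exactly where Python raises
-- (max() on an empty list / pop with an out-of-range index), which Pre_ excludes.
def trimLoop (population : List Int) (fitness : List Int) (max_size : Nat) : List Int × List Int :=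
  if population.length ≤ max_size then (population, fitness)
  else
    match PySem.List.max? fitness (fun y => y) with
    | none => (population, fitness)       -- Python: ValueError from max([]); outside Pre_
    | some m =>
      match PySem.List.index? fitness m with
      | none => (population, fitness)     -- unreachable: m ∈ fitness
      | some i =>
        match hp : PySem.List.pop? population (i : Int), PySem.List.pop? fitness (i : Int) with
        | some pr, some fr => trimLoop pr.2 fr.2 max_size
        | _, _ => (population, fitness)   -- Python: IndexError; outside Pre_
termination_by population.length
decreasing_by
  have := PySem.List.length_of_pop?_eq_some population hp
  omega

def mu_plus_lambda (parents : List Int) (parent_fitness : List Int) (offspring : List Int) (offspring_fitness : List Int) : List Int × List Int :=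
  trimLoop (parents ++ offspring) (parent_fitness ++ offspring_fitness) parents.length

-- ===== PORT B =====
-- the `for p, f in zip(population, fitness)` loop of Source B (appends build the lists in order)
def bgo (t : Int) (skip : Int) (c : Int) : List (Int × Int) → List Int × List Int
  | [] => ([], [])
  | (p, f) :: rest =>
    if t < f then bgo t skip c rest                       -- always removed
    else if f = t ∧ c < skip then bgo t skip (c + 1) rest -- one of the first `skip` ties: removed
    else
      let r := bgo t skip c rest
      (p :: r.1, f :: r.2)

def mu_plus_lambda_alt (parents : List Int) (parent_fitness : List Int) (offspring : List Int) (offspring_fitness : List Int) : List Int × List Int :=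
  let population := parents ++ offspring
  let fitness := parent_fitness ++ offspring_fitness
  let k := population.length - parents.length
  if k = 0 then (population, fitness)
  else
    let svals := PySem.List.sorted fitness (fun y => y) true
    let t := PySem.List.pyGetD svals ((k : Int) - 1) 0    -- Source B indexes svals[k-1]; in range under Pre_
    let hi := fitness.foldl (fun acc f => if t < f then acc + 1 else acc) (0 : Int)  -- sum(1 for f in fitness if f > t)
    let skip := (k : Int) - hi
    bgo t skip 0 (population.zip fitness)

-- ===== PRECONDITION & SPEC =====
-- Pre_ requires the combined fitness list to be parallel to the combined population (their
-- intended shape), except when there are no offspring (nothing is removed, any fitness list is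
-- returned unchanged); on other mismatched lengths A may raise (max of an exhausted fitness
-- list / pop past the end) or misalign the two pops, an accident of its implementation.
def Pre_mu_plus_lambda (parents : List Int) (parent_fitness : List Int) (offspring : List Int) (offspring_fitness : List Int) : Prop :=
  offspring.length = 0 ∨
    parent_fitness.length + offspring_fitness.length = parents.length + offspring.length
instance (parents : List Int) (parent_fitness : List Int) (offspring : List Int) (offspring_fitness : List Int) : Decidable (Pre_mu_plus_lambda parents parent_fitness offspring offspring_fitness) := by unfold Pre_mu_plus_lambda; infer_instance

def pvWitness_mu_plus_lambda : List Int × List Int × List Int × List Int :=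
  ([1, 2], [10, 20], [3, 4], [5, 30])

def Spec_mu_plus_lambda (parents : List Int) (parent_fitness : List Int) (offspring : List Int) (offspring_fitness : List Int) (out : List Int × List Int) : Prop := out = mu_plus_lambda_alt parents parent_fitness offspring offspring_fitness
instance (parents : List Int) (parent_fitness : List Int) (offspring : List Int) (offspring_fitness : List Int) (out : List Int × List Int) : Decidable (Spec_mu_plus_lambda parents parent_fitness offspring offspring_fitness out) := by unfold Spec_mu_plus_lambda; infer_instance

-- ===== CLAIM (what is proved, stated in full; the proofs are below) =====
def Claim_equal_mu_plus_lambda : Prop := ∀ (parents : List Int) (parent_fitness : List Int) (offspring : List Int) (offspring_fitness : List Int), Dom_mu_plus_lambda parents parent_fitness offspring offspring_fitness → Pre_mu_plus_lambda parents parent_fitness offspring offspring_fitness → Spec_mu_plus_lambda parents parent_fitness offspring offspring_fitness (mu_plus_lambda parents parent_fitness offspring offspring_fitness)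

-- ===== LEMMAS AND PROOFS =====

-- Ghost decoration: each (individual, fitness) pair tagged with its original position.
def dec (m : Nat) : List (Int × Int) → List (Nat × Int × Int)
  | [] => []
  | (p, f) :: r => (m, p, f) :: dec (m + 1) r

-- "a is removed before b": larger fitness first, ties by smaller original index.
def keyLT (a b : Nat × Int × Int) : Bool :=
  decide (b.2.2 < a.2.2) || (decide (a.2.2 = b.2.2) && decide (a.1 < b.1))

-- rank of e: how many entries are removed before e
def rk (s : List (Nat × Int × Int)) (e : Nat × Int × Int) : Nat := s.countP (fun a => keyLT a e)

-- survivors when k entries are removed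
def filt (s : List (Nat × Int × Int)) (k : Nat) : List (Nat × Int × Int) :=
  s.filter (fun e => decide (k ≤ rk s e))

lemma dec_map_fst (z : List (Int × Int)) : ∀ m, (dec m z).map (fun e => e.2.1) = z.map Prod.fst := by
  induction z with
  | nil => intro m; rfl
  | cons a r ih => intro m; cases a; simp [dec, ih]

lemma dec_map_snd (z : List (Int × Int)) : ∀ m, (dec m z).map (fun e => e.2.2) = z.map Prod.snd := by
  induction z with
  | nil => intro m; rfl
  | cons a r ih => intro m; cases a; simp [dec, ih]

lemma length_dec (z : List (Int × Int)) : ∀ m, (dec m z).length = z.length := by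
  induction z with
  | nil => intro m; rfl
  | cons a r ih => intro m; cases a; simp [dec, ih]

lemma mem_dec_le (z : List (Int × Int)) : ∀ m e, e ∈ dec m z → m ≤ e.1 := by
  induction z with
  | nil => intro m e h; simp [dec] at h
  | cons a r ih =>
    intro m e h
    cases a with
    | mk p f =>
      simp only [dec, List.mem_cons] at h
      rcases h with h | h
      · subst h; exact le_refl _
      · have := ih (m + 1) e h; omega

lemma dec_pairwise (z : List (Int × Int)) : ∀ m, (dec m z).Pairwise (fun a b => a.1 < b.1) := by
  induction z with
  | nil => intro m; simp [dec]
  | cons a r ih =>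
    intro m
    cases a with
    | mk p f =>
      refine List.Pairwise.cons ?_ (ih (m + 1))
      intro e he
      have := mem_dec_le r (m + 1) e he
      omega

lemma ne_idx_of_mem_eraseIdx (s : List (Nat × Int × Int)) (i : Nat) (hi : i < s.length)
    (hpw : s.Pairwise (fun a b => a.1 < b.1)) (a : Nat × Int × Int) (ha : a ∈ s.eraseIdx i) :
    a.1 ≠ s[i].1 := by
  have hpw' := List.pairwise_iff_getElem.mp hpw
  rw [List.eraseIdx_eq_take_drop_succ] at ha
  rcases List.mem_append.mp ha with h | h
  · obtain ⟨q, hq, rfl⟩ := List.mem_iff_getElem.mp h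
    have hql : q < i := by
      have := hq; simp [List.length_take] at this; omega
    rw [List.getElem_take]
    exact Nat.ne_of_lt (hpw' q i (by omega) hi hql)
  · obtain ⟨q, hq, rfl⟩ := List.mem_iff_getElem.mp h
    have hql : i + 1 + q < s.length := by
      have := hq; simp [List.length_drop] at this; omega
    rw [List.getElem_drop]
    exact (Nat.ne_of_lt (hpw' i (i + 1 + q) hi hql (by omega))).symm

lemma rk_erase (s : List (Nat × Int × Int)) (i : Nat) (hi : i < s.length)
    (hpw : s.Pairwise (fun a b => a.1 < b.1))
    (hmin : ∀ a ∈ s, a.1 ≠ s[i].1 → keyLT s[i] a = true)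
    (a : Nat × Int × Int) (ha : a ∈ s.eraseIdx i) :
    rk s a = rk (s.eraseIdx i) a + 1 := by
  have hmem : a ∈ s := (List.eraseIdx_sublist s i).subset ha
  have hne : a.1 ≠ s[i].1 := ne_idx_of_mem_eraseIdx s i hi hpw a ha
  have hk : keyLT s[i] a = true := hmin a hmem hne
  have hs : s = s.take i ++ s[i] :: s.drop (i + 1) := by
    conv_lhs => rw [← List.take_append_drop i s, List.drop_eq_getElem_cons hi]
  unfold rk
  conv_lhs => rw [hs]
  rw [List.countP_append, List.countP_cons, List.eraseIdx_eq_take_drop_succ, List.countP_append]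
  simp [hk]
  omega

lemma filt_step (s : List (Nat × Int × Int)) (i : Nat) (k : Nat) (hi : i < s.length)
    (hpw : s.Pairwise (fun a b => a.1 < b.1))
    (hz : rk s s[i] = 0)
    (hmin : ∀ a ∈ s, a.1 ≠ s[i].1 → keyLT s[i] a = true) :
    filt s (k + 1) = filt (s.eraseIdx i) k := by
  have hstep : ∀ a ∈ s.eraseIdx i, rk s a = rk (s.eraseIdx i) a + 1 :=
    fun a ha => rk_erase s i hi hpw hmin a ha
  have hs : s = s.take i ++ s[i] :: s.drop (i + 1) := by
    conv_lhs => rw [← List.take_append_drop i s, List.drop_eq_getElem_cons hi]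
  unfold filt
  set p : (Nat × Int × Int) → Bool := fun e => decide (k + 1 ≤ rk s e) with hp
  have h1 : s.filter p = (s.eraseIdx i).filter p := by
    have hpi : p s[i] = false := by rw [hp]; simp [hz]
    conv_lhs => rw [hs]
    rw [List.eraseIdx_eq_take_drop_succ, List.filter_append, List.filter_cons, hpi,
      List.filter_append]
    simp
  rw [h1]
  exact List.filter_congr (fun a ha => by
    have := hstep a ha
    rw [hp]
    simp only [decide_eq_decide]
    omega)

lemma filt_zero (s : List (Nat × Int × Int)) : filt s 0 = s := by
  unfold filt
  simp

-- A's loop computes exactly the rank-filtered survivors.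
lemma trim_eq (k : Nat) : ∀ (s : List (Nat × Int × Int)) (n : Nat),
    s.Pairwise (fun a b => a.1 < b.1) → s.length = n + k →
    trimLoop (s.map (fun e => e.2.1)) (s.map (fun e => e.2.2)) n
      = ((filt s k).map (fun e => e.2.1), (filt s k).map (fun e => e.2.2)) := by
  induction k with
  | zero =>
    intro s n hpw hlen
    rw [trimLoop]
    simp [hlen, filt_zero]
  | succ k ih =>
    intro s n hpw hlen
    have hsl : s.length = n + k + 1 := by omega
    have hpw' := List.pairwise_iff_getElem.mp hpw
    -- the current fitness list
    have hFlen : (s.map (fun e => e.2.2)).length = n + k + 1 := by simp [hsl]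
    have hFne : s.map (fun e => e.2.2) ≠ [] := by
      intro h; rw [h] at hFlen; simp at hFlen
    obtain ⟨m, hmax⟩ : ∃ m, PySem.List.max? (s.map (fun e => e.2.2)) (fun y => y) = some m := by
      cases hm : PySem.List.max? (s.map (fun e => e.2.2)) (fun y => y) with
      | none => exact absurd ((PySem.List.max?_eq_none_iff _ _).mp hm) hFne
      | some m => exact ⟨m, rfl⟩
    have hmem : m ∈ s.map (fun e => e.2.2) := PySem.List.max?_mem hmax
    have hle : ∀ y ∈ s.map (fun e => e.2.2), y ≤ m := PySem.List.max?_isMax hmax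
    obtain ⟨i, hidx⟩ : ∃ i, PySem.List.index? (s.map (fun e => e.2.2)) m = some i := by
      have := (PySem.List.index?_isSome_iff (s.map (fun e => e.2.2)) m).mpr hmem
      exact Option.isSome_iff_exists.mp this
    obtain ⟨hiF, hFi, hfirst⟩ := PySem.List.getElem_of_index?_eq_some hidx
    have his : i < s.length := by simpa using hiF
    have hfit : s[i].2.2 = m := by simpa using hFi
    have hleq : ∀ (q : Nat) (hq : q < s.length), s[q].2.2 ≤ m := by
      intro q hq
      have : s[q].2.2 ∈ s.map (fun e => e.2.2) := by
        exact List.mem_map_of_mem (List.getElem_mem hq)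
      exact hle _ this
    have hfirst' : ∀ (q : Nat) (hq : q < s.length), q < i → s[q].2.2 ≠ m := by
      intro q hq hqi
      have := hfirst q (by omega)
      simpa using this
    -- the chosen entry is removed before every other entry
    have hmin : ∀ a ∈ s, a.1 ≠ s[i].1 → keyLT s[i] a = true := by
      intro a ha hne
      obtain ⟨q, hq, rfl⟩ := List.mem_iff_getElem.mp ha
      have hqi : q ≠ i := by
        intro h; exact hne (by subst h; rfl)
      rcases lt_trichotomy q i with h | h | h
      · have : s[q].2.2 < m := lt_of_le_of_ne (hleq q hq) (hfirst' q hq h)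
        simp [keyLT, hfit, this]
      · exact absurd h hqi
      · by_cases heq : s[q].2.2 = m
        · have : s[i].1 < s[q].1 := hpw' i q his hq h
          simp [keyLT, hfit, heq, this]
        · have : s[q].2.2 < m := lt_of_le_of_ne (hleq q hq) heq
          simp [keyLT, hfit, this]
    -- nothing is removed before it
    have hz : rk s s[i] = 0 := by
      unfold rk
      rw [List.countP_eq_zero]
      intro a ha
      obtain ⟨q, hq, rfl⟩ := List.mem_iff_getElem.mp ha
      rcases lt_trichotomy q i with h | h | h
      · have : s[q].2.2 < m := lt_of_le_of_ne (hleq q hq) (hfirst' q hq h)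
        simp [keyLT, hfit]
        constructor
        · omega
        · intro he; omega
      · subst h; simp [keyLT]
      · by_cases heq : s[q].2.2 = m
        · have : s[i].1 < s[q].1 := hpw' i q his hq h
          simp [keyLT, hfit, heq]
          omega
        · have : s[q].2.2 < m := lt_of_le_of_ne (hleq q hq) heq
          simp [keyLT, hfit]
          constructor
          · omega
          · intro he; omega
    have hpopP : PySem.List.pop? (s.map (fun e => e.2.1)) (i : Int)
        = some ((s.map (fun e => e.2.1))[i]'(by simpa using his),
                (s.map (fun e => e.2.1)).eraseIdx i) :=
      PySem.List.pop?_natCast _ i (by simpa using his)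
    have hpopF : PySem.List.pop? (s.map (fun e => e.2.2)) (i : Int)
        = some ((s.map (fun e => e.2.2))[i]'hiF, (s.map (fun e => e.2.2)).eraseIdx i) :=
      PySem.List.pop?_natCast _ i hiF
    rw [trimLoop]
    have hcond : ¬ (s.map (fun e => e.2.1)).length ≤ n := by simp [hsl]
    rw [if_neg hcond]
    simp only [hmax, hidx]
    split
    · next x pr fr hpr hfr =>
      rw [hpopP] at hpr
      rw [hpopF] at hfr
      obtain rfl := (Option.some_inj.mp hpr).symm
      obtain rfl := (Option.some_inj.mp hfr).symm
      simp only [List.eraseIdx_map]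
      rw [ih (s.eraseIdx i) n (hpw.sublist (List.eraseIdx_sublist s i))
        (by rw [List.length_eraseIdx_of_lt his]; omega)]
      rw [filt_step s i k his hpw hz hmin]
    · next x hcontra =>
      exact (hcontra _ _ hpopP hpopF).elim


lemma countP_le_split (f₀ : Int) (l : List Int) :
    l.countP (fun y => decide (f₀ ≤ y))
      = l.countP (fun y => decide (f₀ < y)) + l.countP (fun y => decide (y = f₀)) := by
  induction l with
  | nil => simp
  | cons a l ih =>
    simp only [List.countP_cons, ih]
    rcases lt_trichotomy f₀ a with h | h | h
    · simp [h, le_of_lt h, h.ne']; omega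
    · subst h; simp; omega
    · simp [h.not_gt, h.ne, (not_le_of_gt h)]

lemma countP_take_le (p : Int → Bool) (j : Nat) (l : List Int) :
    (l.take j).countP p ≤ l.countP p := by
  conv_rhs => rw [← List.take_append_drop j l]
  rw [List.countP_append]
  omega

lemma countP_dec (p₀ : Int) (f₀ : Int) (j : Nat) (z : List (Int × Int)) : ∀ m,
    (dec m z).countP (fun a => keyLT a (j, p₀, f₀))
      = ((z.map Prod.snd).take (j - m)).countP (fun y => decide (f₀ ≤ y))
        + ((z.map Prod.snd).drop (j - m)).countP (fun y => decide (f₀ < y)) := by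
  induction z with
  | nil => intro m; simp [dec]
  | cons a r ih =>
    intro m
    cases a with
    | mk p f₂ =>
      by_cases hmj : m < j
      · have hsub : j - m = (j - (m + 1)) + 1 := by omega
        have hhead : keyLT (m, p, f₂) (j, p₀, f₀) = decide (f₀ ≤ f₂) := by
          simp only [keyLT, hmj, decide_true, Bool.and_true]
          rw [show (decide (f₀ < f₂) || decide (f₂ = f₀)) = decide (f₀ < f₂ ∨ f₂ = f₀) by
            simp, decide_eq_decide]
          omega
        simp only [dec, List.countP_cons, ih (m + 1), List.map_cons, hsub,
          List.take_succ_cons, List.drop_succ_cons, hhead]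
        simp
        omega
      · have hsub1 : j - m = 0 := by omega
        have hsub2 : j - (m + 1) = 0 := by omega
        have hhead : keyLT (m, p, f₂) (j, p₀, f₀) = decide (f₀ < f₂) := by
          simp only [keyLT, hmj, decide_false, Bool.and_false, Bool.or_false]
        simp only [dec, List.countP_cons, ih (m + 1), List.map_cons, hsub1, hsub2,
          List.take_zero, List.drop_zero, hhead]
        simp

lemma rk_dec_entry (z : List (Int × Int)) (j : Nat) (p₀ f₀ : Int) :
    rk (dec 0 z) (j, p₀, f₀)
      = (z.map Prod.snd).countP (fun y => decide (f₀ < y))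
        + ((z.map Prod.snd).take j).countP (fun y => decide (y = f₀)) := by
  unfold rk
  rw [countP_dec p₀ f₀ j z 0]
  simp only [Nat.sub_zero]
  rw [countP_le_split]
  have hsplit : (z.map Prod.snd).countP (fun y => decide (f₀ < y))
      = ((z.map Prod.snd).take j).countP (fun y => decide (f₀ < y))
        + ((z.map Prod.snd).drop j).countP (fun y => decide (f₀ < y)) := by
    conv_lhs => rw [← List.take_append_drop j (z.map Prod.snd)]
    rw [List.countP_append]
  omega

-- B's single pass computes exactly the rank-filtered survivors.
lemma bgo_eq (z : List (Int × Int)) (t : Int) (k : Nat) (skip : Int)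
    (hhi : (z.map Prod.snd).countP (fun y => decide (t < y)) < k)
    (hlo : k ≤ (z.map Prod.snd).countP (fun y => decide (t ≤ y)))
    (hskip : skip = (k : Int) - ((z.map Prod.snd).countP (fun y => decide (t < y)) : Int)) :
    ∀ (w : List (Int × Int)) (j : Nat), w = z.drop j →
    bgo t skip (min skip ((((z.map Prod.snd).take j).countP (fun y => decide (y = t)) : Int))) w
      = (((dec j w).filter (fun e => decide (k ≤ rk (dec 0 z) e))).map (fun e => e.2.1),
         ((dec j w).filter (fun e => decide (k ≤ rk (dec 0 z) e))).map (fun e => e.2.2)) := by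
  intro w
  induction w with
  | nil => intro j hw; simp [bgo, dec]
  | cons a rest ih =>
    intro j hw
    cases a with
    | mk p f =>
      have hjlt : j < z.length := by
        by_contra h
        rw [List.drop_eq_nil_of_le (by omega)] at hw
        exact List.cons_ne_nil _ _ hw
      rw [List.drop_eq_getElem_cons hjlt] at hw
      injection hw with hpf hrest
      have hFlen : (z.map Prod.snd).length = z.length := by simp
      have hFj : (z.map Prod.snd)[j]'(by omega) = f := by
        simp [← hpf]
      have hcnt1 : ((z.map Prod.snd).take (j + 1)).countP (fun y => decide (y = t))
          = ((z.map Prod.snd).take j).countP (fun y => decide (y = t))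
            + (if f = t then 1 else 0) := by
        rw [List.take_succ]
        rw [List.countP_append]
        have : (z.map Prod.snd)[j]? = some f := by
          rw [List.getElem?_eq_getElem (by omega)]; rw [hFj]
        rw [this]
        simp only [Option.toList_some, List.countP_cons, List.countP_nil]
        by_cases hft : f = t <;> simp [hft]
      have hcntf1 : ((z.map Prod.snd).take (j + 1)).countP (fun y => decide (y = f))
          = ((z.map Prod.snd).take j).countP (fun y => decide (y = f)) + 1 := by
        rw [List.take_succ]
        rw [List.countP_append]
        have : (z.map Prod.snd)[j]? = some f := by
          rw [List.getElem?_eq_getElem (by omega)]; rw [hFj]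
        rw [this]
        simp
      have hrk : rk (dec 0 z) (j, p, f)
          = (z.map Prod.snd).countP (fun y => decide (f < y))
            + ((z.map Prod.snd).take j).countP (fun y => decide (y = f)) :=
        rk_dec_entry z j p f
      simp only [dec, bgo, List.filter_cons]
      by_cases h1 : t < f
      · -- always removed: its rank is below k
        have hub : ((z.map Prod.snd).take j).countP (fun y => decide (y = f)) + 1
            ≤ (z.map Prod.snd).countP (fun y => decide (y = f)) := by
          rw [← hcntf1]; exact countP_take_le _ _ _
        have hmono : (z.map Prod.snd).countP (fun y => decide (f ≤ y))
            ≤ (z.map Prod.snd).countP (fun y => decide (t < y)) := by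
          apply List.countP_mono_left
          intro x _ hx
          simp at hx ⊢
          omega
        have hrlt : rk (dec 0 z) (j, p, f) < k := by
          have := countP_le_split f (z.map Prod.snd)
          omega
        have hpred : decide (k ≤ rk (dec 0 z) (j, p, f)) = false := by
          simp; omega
        rw [if_pos h1, hpred]
        have hmincnt : ((z.map Prod.snd).take (j + 1)).countP (fun y => decide (y = t))
            = ((z.map Prod.snd).take j).countP (fun y => decide (y = t)) := by
          rw [hcnt1]; simp [show f ≠ t by omega]
        have := ih (j + 1) hrest
        rw [hmincnt] at this
        rw [this]
        simp
      · by_cases h2 : f = t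
        · subst h2
          -- rank of this entry: entries above f plus earlier ties
          have hrk' : rk (dec 0 z) (j, p, f)
              = (z.map Prod.snd).countP (fun y => decide (f < y))
                + ((z.map Prod.snd).take j).countP (fun y => decide (y = f)) := hrk
          by_cases h3 : min skip (((((z.map Prod.snd).take j).countP (fun y => decide (y = f)) : Nat)) : Int) < skip
          · -- one of the first `skip` ties: removed
            have hclt : ((((z.map Prod.snd).take j).countP (fun y => decide (y = f)) : Nat) : Int) < skip := by
              omega
            have hrlt : rk (dec 0 z) (j, p, f) < k := by omega
            have hpred : decide (k ≤ rk (dec 0 z) (j, p, f)) = false := by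
              simp; omega
            rw [if_neg h1, if_pos ⟨rfl, h3⟩, hpred]
            have hcnt1' : ((z.map Prod.snd).take (j + 1)).countP (fun y => decide (y = f))
                = ((z.map Prod.snd).take j).countP (fun y => decide (y = f)) + 1 := by
              rw [hcnt1]; simp
            have := ih (j + 1) hrest
            rw [hcnt1'] at this
            have hmin : min skip ((((z.map Prod.snd).take j).countP (fun y => decide (y = f)) + 1 : Nat) : Int)
                = min skip ((((z.map Prod.snd).take j).countP (fun y => decide (y = f)) : Nat) : Int) + 1 := by
              push_cast
              omega
            rw [hmin] at this
            rw [this]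
            simp
          · -- a later tie: kept
            have hcge : skip ≤ ((((z.map Prod.snd).take j).countP (fun y => decide (y = f)) : Nat) : Int) := by
              omega
            have hrge : k ≤ rk (dec 0 z) (j, p, f) := by omega
            have hpred : decide (k ≤ rk (dec 0 z) (j, p, f)) = true := by
              simp; omega
            rw [if_neg h1, if_neg (by intro hc; exact h3 hc.2), hpred]
            have hcnt1' : ((z.map Prod.snd).take (j + 1)).countP (fun y => decide (y = f))
                = ((z.map Prod.snd).take j).countP (fun y => decide (y = f)) + 1 := by
              rw [hcnt1]; simp
            have := ih (j + 1) hrest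
            rw [hcnt1'] at this
            have hmin : min skip ((((z.map Prod.snd).take j).countP (fun y => decide (y = f)) + 1 : Nat) : Int)
                = min skip ((((z.map Prod.snd).take j).countP (fun y => decide (y = f)) : Nat) : Int) := by
              push_cast
              omega
            rw [hmin] at this
            rw [this]
            simp
        · -- strictly below the threshold: kept
          have hflt : f < t := by
            rcases lt_trichotomy f t with h | h | h
            · exact h
            · exact absurd h h2
            · exact absurd h h1
          have hmono : (z.map Prod.snd).countP (fun y => decide (t ≤ y))
              ≤ (z.map Prod.snd).countP (fun y => decide (f < y)) := by
            apply List.countP_mono_left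
            intro x _ hx
            simp at hx ⊢
            omega
          have hrge : k ≤ rk (dec 0 z) (j, p, f) := by omega
          have hpred : decide (k ≤ rk (dec 0 z) (j, p, f)) = true := by
            simp; omega
          rw [if_neg h1, if_neg (by intro hc; exact h2 hc.1), hpred]
          have hmincnt : ((z.map Prod.snd).take (j + 1)).countP (fun y => decide (y = t))
              = ((z.map Prod.snd).take j).countP (fun y => decide (y = t)) := by
            rw [hcnt1]; simp [h2]
          have := ih (j + 1) hrest
          rw [hmincnt] at this
          rw [this]
          simp



lemma alt_eq (parents parent_fitness offspring offspring_fitness : List Int)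
    (hlen : (parent_fitness ++ offspring_fitness).length = (parents ++ offspring).length) :
    mu_plus_lambda_alt parents parent_fitness offspring offspring_fitness
      = (((filt (dec 0 ((parents ++ offspring).zip (parent_fitness ++ offspring_fitness))) offspring.length).map (fun e => e.2.1)),
         ((filt (dec 0 ((parents ++ offspring).zip (parent_fitness ++ offspring_fitness))) offspring.length).map (fun e => e.2.2))) := by
  have hzmapsnd : ((parents ++ offspring).zip (parent_fitness ++ offspring_fitness)).map Prod.snd
      = parent_fitness ++ offspring_fitness :=
    List.map_snd_zip (le_of_eq hlen)
  have hzmapfst : ((parents ++ offspring).zip (parent_fitness ++ offspring_fitness)).map Prod.fst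
      = parents ++ offspring :=
    List.map_fst_zip (le_of_eq hlen.symm)
  have hk : (parents ++ offspring).length - parents.length = offspring.length := by simp
  unfold mu_plus_lambda_alt
  simp only [hk]
  by_cases hk0 : offspring.length = 0
  · rw [if_pos hk0, hk0, filt_zero, dec_map_fst, dec_map_snd, hzmapfst, hzmapsnd]
  · rw [if_neg hk0]
    -- notation
    set F := parent_fitness ++ offspring_fitness with hF
    set k := offspring.length with hkdef
    have hkF : k ≤ F.length := by
      have : F.length = (parents ++ offspring).length := hlen
      simp only [this, List.length_append]
      omega
    set svals := PySem.List.sorted F (fun y => y) true with hsv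
    have hperm : svals.Perm F := PySem.List.sorted_perm F (fun y => y) true
    have hsvlen : svals.length = F.length := hperm.length_eq
    have hk1 : k - 1 < svals.length := by omega
    have hcast : ((k : Int) - 1) = ((k - 1 : Nat) : Int) := by
      have : 1 ≤ k := by omega
      push_cast [this]
      omega
    have ht : PySem.List.pyGetD svals ((k : Int) - 1) 0 = svals[k - 1] := by
      rw [hcast, PySem.List.pyGetD_natCast, List.getD_eq_getElem svals 0 hk1]
    set t := svals[k - 1] with htdef
    have hpws := List.pairwise_iff_getElem.mp (PySem.List.sorted_pairwise_rev F (fun y => y))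
    have hmono : ∀ (p q : Nat) (hp : p < svals.length) (hq : q < svals.length), p ≤ q →
        svals[q] ≤ svals[p] := by
      intro p q hp hq hle
      rcases Nat.lt_or_ge p q with h | h
      · exact hpws p q hp hq h
      · have : p = q := by omega
        subst this
        exact le_refl _
    have hhiF : F.countP (fun y => decide (t < y)) < k := by
      rw [← hperm.countP_eq]
      conv_lhs => rw [← List.take_append_drop (k - 1) svals]
      rw [List.countP_append]
      have h1 : (svals.take (k - 1)).countP (fun y => decide (t < y)) ≤ k - 1 := by
        calc (svals.take (k - 1)).countP (fun y => decide (t < y))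
            ≤ (svals.take (k - 1)).length := List.countP_le_length
          _ ≤ k - 1 := by simp
      have h2 : (svals.drop (k - 1)).countP (fun y => decide (t < y)) = 0 := by
        rw [List.countP_eq_zero]
        intro a ha
        obtain ⟨q, hq, rfl⟩ := List.mem_iff_getElem.mp ha
        rw [List.getElem_drop]
        have hlt : k - 1 + q < svals.length := by
          have := hq; simp [List.length_drop] at this; omega
        have := hmono (k - 1) (k - 1 + q) hk1 hlt (by omega)
        simp
        omega
      omega
    have hloF : k ≤ F.countP (fun y => decide (t ≤ y)) := by
      rw [← hperm.countP_eq]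
      conv_rhs => rw [← List.take_append_drop k svals]
      rw [List.countP_append]
      have h1 : (svals.take k).countP (fun y => decide (t ≤ y)) = (svals.take k).length := by
        rw [List.countP_eq_length]
        intro a ha
        obtain ⟨q, hq, rfl⟩ := List.mem_iff_getElem.mp ha
        rw [List.getElem_take]
        have hql : q < svals.length := by
          have := hq; simp [List.length_take] at this; omega
        have hqk : q ≤ k - 1 := by
          have := hq; simp [List.length_take] at this; omega
        have := hmono q (k - 1) hql hk1 hqk
        simp
        omega
      have h2 : (svals.take k).length = k := by simp; omega
      omega
    have hfold : F.foldl (fun acc f => if t < f then acc + 1 else acc) (0 : Int)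
        = ((F.countP (fun y => decide (t < y)) : Nat) : Int) := by
      have heqf : (fun (acc : Int) (f : Int) => if t < f then acc + 1 else acc)
          = (fun (acc : Int) (f : Int) => if (fun y => decide (t < y)) f = true then acc + 1 else acc) := by
        funext acc f
        by_cases h : t < f <;> simp [h]
      rw [heqf, PySem.List.foldl_count_if]
      omega
    rw [ht, hfold]
    have hbgo := bgo_eq ((parents ++ offspring).zip F) t k
      ((k : Int) - ((F.countP (fun y => decide (t < y)) : Nat) : Int))
      (by rw [hzmapsnd]; exact hhiF)
      (by rw [hzmapsnd]; exact hloF)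
      (by rw [hzmapsnd]) ((parents ++ offspring).zip F) 0 (by simp)
    have hmin0 : min ((k : Int) - ((F.countP (fun y => decide (t < y)) : Nat) : Int))
        ((((((parents ++ offspring).zip F).map Prod.snd).take 0).countP (fun y => decide (y = t)) : Nat) : Int) = 0 := by
      simp
      omega
    rw [hmin0] at hbgo
    rw [hbgo]
    rfl

-- ===== VERDICT (by name: the statement is the Claim_ definition above) =====
theorem mu_plus_lambda_spec : Claim_equal_mu_plus_lambda := by
  intro parents parent_fitness offspring offspring_fitness hdom hpre
  unfold Spec_mu_plus_lambda
  rcases hpre with hk0 | hsum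
  · -- no offspring: the loop never runs and B's removal count is 0
    obtain rfl : offspring = [] := List.length_eq_zero_iff.mp hk0
    unfold mu_plus_lambda mu_plus_lambda_alt
    rw [trimLoop]
    simp
  have hlen : (parent_fitness ++ offspring_fitness).length = (parents ++ offspring).length := by
    simp only [List.length_append]
    omega
  have hzmapsnd : ((parents ++ offspring).zip (parent_fitness ++ offspring_fitness)).map Prod.snd
      = parent_fitness ++ offspring_fitness :=
    List.map_snd_zip (le_of_eq hlen)
  have hzmapfst : ((parents ++ offspring).zip (parent_fitness ++ offspring_fitness)).map Prod.fst
      = parents ++ offspring :=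
    List.map_fst_zip (le_of_eq hlen.symm)
  have hdecfst : (dec 0 ((parents ++ offspring).zip (parent_fitness ++ offspring_fitness))).map (fun e => e.2.1)
      = parents ++ offspring := by
    rw [dec_map_fst]; exact hzmapfst
  have hdecsnd : (dec 0 ((parents ++ offspring).zip (parent_fitness ++ offspring_fitness))).map (fun e => e.2.2)
      = parent_fitness ++ offspring_fitness := by
    rw [dec_map_snd]; exact hzmapsnd
  have hdeclen : (dec 0 ((parents ++ offspring).zip (parent_fitness ++ offspring_fitness))).length
      = parents.length + offspring.length := by
    rw [length_dec, List.length_zip, hlen]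
    simp
  unfold mu_plus_lambda
  have h := trim_eq offspring.length
    (dec 0 ((parents ++ offspring).zip (parent_fitness ++ offspring_fitness)))
    parents.length (dec_pairwise _ 0) hdeclen
  rw [hdecfst, hdecsnd] at h
  rw [h, alt_eq parents parent_fitness offspring offspring_fitness hlen]
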